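-- pv_equiv track=rewrite | github.com/atakux/Compiler_Project | settingUp.py | get_inputted_reserved_words
-- ===== SOURCE A (Python) =====
-- def get_inputted_reserved_words(text, letters, variable_names):
--    """Get inputted reserved words to check if misspelt"""
--
--    # get inputted reserved words
--    inputted_rw_temp = text.translate({ord(c): " " for c in '"*();:,/-=+ '})
--    inputted_rw = []
--
--    # get all inputted reserved words
--    for rw in inputted_rw_temp.split():
--     if rw in letters:
--       continue
--     elif rw == '"value=",':
--       continue
--     elif rw in variable_names:
--       continue
--     else:
--       inputted_rw.append(rw)
--
--    # remove any digits
--    inputted_rw = [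
--     x for x in inputted_rw
--     if not (x.isdigit() or x[0] == '-' and x[1:].isdigit())
--    ]
--
--    # remove any duplicates
--    in_rw_no_dups = []
--    [
--     in_rw_no_dups.append(item) for item in inputted_rw
--     if item not in in_rw_no_dups
--    ]
--
--    return in_rw_no_dups
-- ===== SOURCE B (Python) =====
-- def get_inputted_reserved_words(text, letters, variable_names):
--     """Get inputted reserved words to check if misspelt.
--
--     Single character-level scan: tokenizes by hand (separator = whitespace or
--     one of the punctuation characters A translates away) and decides each
--     token's fate the moment it is complete -- no translate, no split, no
--     intermediate lists.
--     """
--     result = []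
--     tok = ""
--     for ch in text + " ":  # trailing separator flushes the final token
--         if ch.isspace() or ch in '"*();:,/-=+':
--             if tok and not (
--                 tok in letters
--                 or tok == '"value=",'
--                 or tok in variable_names
--                 or tok.isdigit()
--                 or (tok[0] == "-" and tok[1:].isdigit())
--                 or tok in result
--             ):
--                 result.append(tok)
--             tok = ""
--         else:
--             tok += ch
--     return result
-- ===== Notes on version B (the rewrite author's own statement) =====
-- stated objective: alternative
-- what changed: B replaces A's translate/split pipeline and its three list passes (filter loop, digit-removing comprehension, dedup loop) by a single hand-written character-level scan that tokenizes the text itself and accepts or drops each token the moment it is completed.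
import Mathlib
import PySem

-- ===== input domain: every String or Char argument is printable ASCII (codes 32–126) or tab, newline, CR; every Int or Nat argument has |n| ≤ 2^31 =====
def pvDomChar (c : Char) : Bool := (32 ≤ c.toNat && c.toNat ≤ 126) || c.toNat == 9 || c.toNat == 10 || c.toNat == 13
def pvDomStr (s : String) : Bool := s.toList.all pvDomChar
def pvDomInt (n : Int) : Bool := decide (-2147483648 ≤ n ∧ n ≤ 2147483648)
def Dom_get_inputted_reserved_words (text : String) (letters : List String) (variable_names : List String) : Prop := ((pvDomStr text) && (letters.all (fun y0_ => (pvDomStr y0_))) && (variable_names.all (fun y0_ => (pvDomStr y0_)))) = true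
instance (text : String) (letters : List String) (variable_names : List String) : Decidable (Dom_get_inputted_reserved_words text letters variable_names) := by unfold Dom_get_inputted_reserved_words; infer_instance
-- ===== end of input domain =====

-- B replaces A's translate/split pipeline plus three list passes by one hand-written
-- character-level scan that tokenizes and decides each token as it completes (different
-- decomposition; no speed claim).

-- ===== PORT A =====
-- the characters replaced by a space in text.translate({ord(c): " " for c in '"*();:,/-=+ '})
def pvTransChars : List Char := ['"', '*', '(', ')', ';', ':', ',', '/', '-', '=', '+', ' ']

-- hand port of text.translate(...): each listed character becomes a space (exact: translate maps code points, all ASCII here)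
def pvTranslate (text : String) : List Char :=
  text.toList.map (fun c => if pvTransChars.contains c then ' ' else c)

-- x.isdigit() or x[0] == '-' and x[1:].isdigit()
def pvIsIntLike (x : String) : Bool :=
  PySem.Chars.strIsdigit x.toList ||
    (PySem.List.pyGet? x.toList 0 == some '-' &&
      PySem.Chars.strIsdigit (PySem.List.slice x.toList (some 1) none))

def get_inputted_reserved_words (text : String) (letters : List String) (variable_names : List String) : List String :=
  let inputted_rw_temp : List Char := pvTranslate text
  -- for rw in inputted_rw_temp.split(): if/elif chain, else append
  let inputted_rw : List String :=
    ((PySem.Chars.split₀ inputted_rw_temp).map String.mk).foldl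
      (fun acc rw =>
        if rw ∈ letters then acc
        else if rw = "\"value=\"," then acc
        else if rw ∈ variable_names then acc
        else acc ++ [rw]) []
  -- remove any digits
  let inputted_rw2 : List String := inputted_rw.filter (fun x => ¬ pvIsIntLike x)
  -- remove any duplicates
  inputted_rw2.foldl (fun acc item => if item ∈ acc then acc else acc ++ [item]) []

-- ===== PORT B =====
-- ch in '"*();:,/-=+'
def pvDelims : List Char := ['"', '*', '(', ')', ';', ':', ',', '/', '-', '=', '+']

-- ch.isspace() or ch in '"*();:,/-=+'
def pvSep (c : Char) : Bool := PySem.Chars.isspace c || pvDelims.contains c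

-- the big 'or' inside B's flush condition
def pvSkip (letters variable_names res : List String) (w : String) : Bool :=
  letters.contains w || w == "\"value=\"," || variable_names.contains w ||
    pvIsIntLike w || res.contains w

-- the for-loop over the characters: tok is the pending token, res the result list
def pvScan (letters variable_names : List String) : List Char → List Char → List String → List String
  | [], _tok, res => res
  | c :: cs, tok, res =>
    if pvSep c then
      pvScan letters variable_names cs []
        (if !tok.isEmpty && !pvSkip letters variable_names res (String.mk tok) then
          res ++ [String.mk tok]
        else res)
    else pvScan letters variable_names cs (tok ++ [c]) res

def get_inputted_reserved_words_alt (text : String) (letters : List String) (variable_names : List String) : List String :=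
  pvScan letters variable_names (text.toList ++ [' ']) [] []

-- ===== PRECONDITION & SPEC =====
def Spec_get_inputted_reserved_words (text : String) (letters : List String) (variable_names : List String) (out : List String) : Prop := out = get_inputted_reserved_words_alt text letters variable_names
instance (text : String) (letters : List String) (variable_names : List String) (out : List String) : Decidable (Spec_get_inputted_reserved_words text letters variable_names out) := by unfold Spec_get_inputted_reserved_words; infer_instance

-- ===== CLAIM (what is proved, stated in full; the proofs are below) =====
def Claim_equal_get_inputted_reserved_words : Prop := ∀ (text : String) (letters : List String) (variable_names : List String), Dom_get_inputted_reserved_words text letters variable_names → Spec_get_inputted_reserved_words text letters variable_names (get_inputted_reserved_words text letters variable_names)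

-- ===== LEMMAS AND PROOFS =====

-- A's first loop builds acc ++ the tokens surviving the skip conditions
theorem pvLoop1_eq (letters variable_names : List String) (ts : List String) (acc : List String) :
    ts.foldl
      (fun acc rw =>
        if rw ∈ letters then acc
        else if rw = "\"value=\"," then acc
        else if rw ∈ variable_names then acc
        else acc ++ [rw]) acc
    = acc ++ ts.filter (fun rw => ¬ (rw ∈ letters ∨ rw = "\"value=\"," ∨ rw ∈ variable_names)) := by
  induction ts generalizing acc with
  | nil => simp
  | cons t ts ih =>
    simp only [List.foldl_cons, List.filter_cons]
    by_cases h1 : t ∈ letters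
    · simp [h1, ih]
    · by_cases h2 : t = "\"value=\","
      · simp [h2, ih]
      · by_cases h3 : t ∈ variable_names
        · simp [h1, h2, h3, ih]
        · simp [h1, h2, h3, ih]

-- A's two filters followed by its dedup fold = one fold with the combined pvSkip test
theorem pvCombine_eq (letters variable_names : List String) (ts : List String) (res : List String) :
    ((ts.filter (fun rw => ¬ (rw ∈ letters ∨ rw = "\"value=\"," ∨ rw ∈ variable_names))).filter
        (fun x => ¬ pvIsIntLike x)).foldl
      (fun acc item => if item ∈ acc then acc else acc ++ [item]) res
    = ts.foldl (fun r w => if pvSkip letters variable_names r w then r else r ++ [w]) res := by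
  induction ts generalizing res with
  | nil => simp
  | cons t ts ih =>
    by_cases h1 : t ∈ letters ∨ t = "\"value=\"," ∨ t ∈ variable_names
    · have hs : pvSkip letters variable_names res t = true := by
        rcases h1 with h | h | h <;> simp [pvSkip, h]
      rw [List.foldl_cons, if_pos hs, List.filter_cons_of_neg (by simp only [decide_eq_true_eq, not_not]; exact h1)]
      exact ih res
    · by_cases h2 : pvIsIntLike t = true
      · have hs : pvSkip letters variable_names res t = true := by simp [pvSkip, h2]
        rw [List.foldl_cons, if_pos hs, List.filter_cons_of_pos (by simp only [decide_eq_true_eq]; exact h1),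
          List.filter_cons_of_neg (by simp [h2])]
        exact ih res
      · by_cases h3 : t ∈ res
        · have hs : pvSkip letters variable_names res t = true := by simp [pvSkip, h3]
          rw [List.foldl_cons, if_pos hs, List.filter_cons_of_pos (by simp only [decide_eq_true_eq]; exact h1),
            List.filter_cons_of_pos (by simp [h2]), List.foldl_cons, if_pos h3]
          exact ih res
        · have h1' := h1
          rw [not_or, not_or] at h1'
          have h2' : pvIsIntLike t = false := by simpa using h2
          have hs : pvSkip letters variable_names res t = false := by
            simp only [pvSkip, Bool.or_eq_false_iff, List.contains_eq_mem,
              decide_eq_false_iff_not, beq_eq_false_iff_ne, ne_eq, h2']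
            tauto
          rw [List.foldl_cons, if_neg (by simp [hs]), List.filter_cons_of_pos (by simp only [decide_eq_true_eq]; exact h1),
            List.filter_cons_of_pos (by simp [h2]), List.foldl_cons, if_neg h3]
          exact ih (res ++ [t])

-- translating a character and asking Python-split whether it is whitespace = B's separator test
theorem pvIsspace_trans (c : Char) :
    PySem.Chars.isspace (if pvTransChars.contains c then ' ' else c) = pvSep c := by
  by_cases h : c ∈ pvTransChars
  · rw [if_pos (by simpa using h)]
    simp only [pvTransChars, List.mem_cons, List.not_mem_nil, or_false] at h
    rcases h with h|h|h|h|h|h|h|h|h|h|h|h <;> subst h <;> decide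
  · rw [if_neg (by simpa using h)]
    have hd : pvDelims.contains c = false := by
      simp only [List.contains_eq_mem, decide_eq_false_iff_not]
      intro hm
      refine h ?_
      simp only [pvDelims, List.mem_cons, List.not_mem_nil, or_false] at hm
      rcases hm with h'|h'|h'|h'|h'|h'|h'|h'|h'|h'|h' <;> subst h' <;> decide
    simp only [pvSep]
    rw [hd]
    simp

-- a character B does not treat as a separator is left alone by A's translation
theorem pvTrans_of_not_sep (c : Char) (h : pvSep c = false) :
    (if pvTransChars.contains c then ' ' else c) = c := by
  have hm : c ∉ pvTransChars := by
    intro hm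
    simp only [pvTransChars, List.mem_cons, List.not_mem_nil, or_false] at hm
    rcases hm with h'|h'|h'|h'|h'|h'|h'|h'|h'|h'|h'|h' <;> subst h' <;> exact absurd h (by decide)
  simp [hm]

-- split₀.go's token accumulator prepends: pull it out front
theorem pvGo_acc (cs : List Char) : ∀ (cur : List Char) (acc : List (List Char)),
    PySem.Chars.split₀.go cs cur acc = acc.reverse ++ PySem.Chars.split₀.go cs cur [] := by
  induction cs with
  | nil =>
    intro cur acc
    simp only [PySem.Chars.split₀.go]
    by_cases h : cur.isEmpty <;> simp [h]
  | cons c cs ih =>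
    intro cur acc
    simp only [PySem.Chars.split₀.go]
    by_cases hs : PySem.Chars.isspace c = true
    · by_cases he : cur.isEmpty
      · simp only [hs, he, if_true]
        exact ih [] acc
      · simp only [hs, he, if_true, Bool.false_eq_true, if_false]
        rw [ih [] (cur.reverse :: acc), ih [] [cur.reverse]]
        simp
    · simp only [hs, Bool.false_eq_true, if_false]
      exact ih (c :: cur) acc

-- B's flush (guarded by token non-emptiness) written as the per-token step of the fold
theorem pvFlush_eq (letters variable_names res : List String) (a : Char) (as : List Char) :
    (if !(a :: as).isEmpty && !pvSkip letters variable_names res (String.mk (a :: as)) then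
        res ++ [String.mk (a :: as)]
      else res)
    = (if pvSkip letters variable_names res (String.mk (a :: as)) then res
        else res ++ [String.mk (a :: as)]) := by
  cases hk : pvSkip letters variable_names res (String.mk (a :: as)) <;> simp [hk]

-- B's scan over the raw characters (with the flushing sentinel) = the combined fold over
-- Python-split's tokens of the translated characters
theorem pvScan_eq (letters variable_names : List String) (cs : List Char) :
    ∀ (cur : List Char) (res : List String),
    pvScan letters variable_names (cs ++ [' ']) cur res
    = ((PySem.Chars.split₀.go (cs.map (fun c => if pvTransChars.contains c then ' ' else c))
          cur.reverse []).map String.mk).foldl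
        (fun r w => if pvSkip letters variable_names r w then r else r ++ [w]) res := by
  induction cs with
  | nil =>
    intro cur res
    have hsep : pvSep ' ' = true := by decide
    simp only [List.nil_append, List.map_nil, pvScan, hsep, if_true, PySem.Chars.split₀.go]
    cases cur with
    | nil => simp [pvScan]
    | cons a as =>
      have hne : (as.reverse ++ [a]).isEmpty = false := by simp
      simp only [List.reverse_cons, hne, Bool.false_eq_true, if_false, List.reverse_append,
        List.reverse_reverse, List.reverse_nil, List.nil_append, List.singleton_append,
        List.map_cons, List.map_nil, List.foldl_cons, List.foldl_nil]
      exact pvFlush_eq letters variable_names res a as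
  | cons c cs ih =>
    intro cur res
    simp only [List.cons_append, List.map_cons, pvScan]
    by_cases hs : pvSep c = true
    · rw [if_pos hs, ih []]
      simp only [PySem.Chars.split₀.go, pvIsspace_trans c, hs, if_true, List.reverse_nil]
      cases cur with
      | nil => simp
      | cons a as =>
        have hne : (as.reverse ++ [a]).isEmpty = false := by simp
        simp only [List.reverse_cons, hne, Bool.false_eq_true, if_false, List.reverse_append,
          List.reverse_reverse, List.reverse_nil, List.nil_append, List.singleton_append]
        rw [pvGo_acc _ [] [a :: as]]
        simp only [List.map_append, List.map_cons, List.map_nil, List.reverse_cons,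
          List.reverse_nil, List.nil_append, List.foldl_append, List.foldl_cons, List.foldl_nil]
        rw [pvFlush_eq letters variable_names res a as]
    · have hs' : pvSep c = false := by simpa using hs
      have hsp : PySem.Chars.isspace c = false := by
        have h' := hs'
        simp only [pvSep, Bool.or_eq_false_iff] at h'
        exact h'.1
      rw [if_neg hs, ih (cur ++ [c]) res, pvTrans_of_not_sep c hs']
      simp only [PySem.Chars.split₀.go, hsp, Bool.false_eq_true, if_false, List.reverse_append,
        List.reverse_cons, List.reverse_nil, List.nil_append, List.singleton_append]

-- ===== VERDICT (by name: the statement is the Claim_ definition above) =====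
theorem get_inputted_reserved_words_spec : Claim_equal_get_inputted_reserved_words := by
  intro text letters variable_names _
  unfold Spec_get_inputted_reserved_words get_inputted_reserved_words get_inputted_reserved_words_alt
  simp only []
  rw [pvLoop1_eq]
  rw [List.nil_append, pvCombine_eq]
  rw [pvScan_eq letters variable_names text.toList [] []]
  rfl
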